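-- pv_equiv track=rewrite | github.com/ysyesilyurt/Metu-CENG | 445-with-phases/phase3/util.py | reverseAddress
-- ===== SOURCE A (Python) =====
-- def reverseAddress(nodeID):
--     address = []
--     while nodeID > 1:
--         if nodeID % 2 == 0:
--             address.append(0)
--         else:
--             address.append(1)
--         nodeID //= 2
--     address.reverse()
--     return tuple(address)
-- ===== SOURCE B (Python) =====
-- def reverseAddress(nodeID):
--     if nodeID <= 1:
--         return ()
--     return tuple(int(c) for c in bin(nodeID)[3:])
-- ===== Notes on version B (the rewrite author's own statement) =====
-- stated objective: idiomatic
-- what changed: Replaces the manual bit-extraction while-loop with list reversal by the library call bin(nodeID), dropping the '0b1' prefix and mapping the remaining digit characters to ints.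
import Mathlib
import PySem

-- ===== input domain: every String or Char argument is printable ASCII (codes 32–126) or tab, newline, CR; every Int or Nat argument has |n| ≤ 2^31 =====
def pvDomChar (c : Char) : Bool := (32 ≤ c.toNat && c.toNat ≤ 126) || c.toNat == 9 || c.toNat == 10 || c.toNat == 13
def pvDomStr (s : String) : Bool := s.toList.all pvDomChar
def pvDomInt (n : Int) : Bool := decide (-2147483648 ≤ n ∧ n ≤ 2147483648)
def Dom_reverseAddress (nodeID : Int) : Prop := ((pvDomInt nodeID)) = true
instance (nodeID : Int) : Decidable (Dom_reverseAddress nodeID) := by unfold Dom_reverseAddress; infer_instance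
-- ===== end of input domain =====

-- B replaces A's bit-extraction while-loop (LSB-first list, then reverse) by the
-- binary string bin(nodeID) with the '0b1' prefix dropped (idiomatic, same cost).

-- ===== PORT A =====
-- the while-loop of A: state is (nodeID, address)
def reverseAddressGo (n : Int) (address : List Int) : List Int :=
  if _h : n > 1 then
    reverseAddressGo (PySem.Int.floordiv n 2)
      (address ++ [if PySem.Int.mod n 2 == 0 then (0 : Int) else 1])
  else address
termination_by n.toNat
decreasing_by
  rw [PySem.Int.floordiv_eq_ediv_of_pos (by omega)]
  omega

def reverseAddress (nodeID : Int) : List Int :=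
  (reverseAddressGo nodeID []).reverse

-- ===== PORT B =====
-- hand port of Python's bin(n) for n ≥ 0, without the "0b" prefix: exact on Nat
-- (MSB-first binary digit characters; bin(n) = "0b" ++ these)
def binCharsB (n : Nat) : List Char :=
  if _h : n = 0 then [] else binCharsB (n / 2) ++ [if n % 2 = 1 then '1' else '0']
termination_by n
decreasing_by omega

def reverseAddress_alt (nodeID : Int) : List Int :=
  if nodeID ≤ 1 then []
  else (List.drop 3 ('0' :: 'b' :: binCharsB nodeID.toNat)).map
        (fun c => (c.toNat : Int) - 48)   -- int(c) on a digit character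

-- ===== PRECONDITION & SPEC =====
def Spec_reverseAddress (nodeID : Int) (out : List Int) : Prop := out = reverseAddress_alt nodeID
instance (nodeID : Int) (out : List Int) : Decidable (Spec_reverseAddress nodeID out) := by unfold Spec_reverseAddress; infer_instance

-- ===== CLAIM (what is proved, stated in full; the proofs are below) =====
def Claim_equal_reverseAddress : Prop := ∀ (nodeID : Int), Dom_reverseAddress nodeID → Spec_reverseAddress nodeID (reverseAddress nodeID)

-- ===== LEMMAS AND PROOFS =====

lemma binCharsB_ne_nil (n : Nat) (hn : n ≠ 0) : binCharsB n ≠ [] := by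
  rw [binCharsB]
  simp [hn]

lemma reverseAddressGo_stop (n : Int) (acc : List Int) (h : ¬ n > 1) :
    reverseAddressGo n acc = acc := by
  rw [reverseAddressGo]; simp [h]

lemma reverseAddressGo_step (n : Int) (acc : List Int) (h : n > 1) :
    reverseAddressGo n acc =
      reverseAddressGo (PySem.Int.floordiv n 2)
        (acc ++ [if PySem.Int.mod n 2 == 0 then (0 : Int) else 1]) := by
  rw [reverseAddressGo]; simp [h]

lemma reverseAddressGo_append (k : Nat) :
    ∀ (n : Int) (acc : List Int), n.toNat ≤ k →
      reverseAddressGo n acc = acc ++ reverseAddressGo n [] := by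
  induction k with
  | zero =>
    intro n acc hk
    have h : ¬ n > 1 := by omega
    rw [reverseAddressGo_stop _ _ h, reverseAddressGo_stop _ _ h]
    simp
  | succ k ih =>
    intro n acc hk
    by_cases h : n > 1
    · have hlt : (PySem.Int.floordiv n 2).toNat ≤ k := by
        rw [PySem.Int.floordiv_eq_ediv_of_pos (by omega)]; omega
      rw [reverseAddressGo_step _ _ h, reverseAddressGo_step _ [] h,
          ih _ _ hlt, ih _ ([] ++ [if PySem.Int.mod n 2 == 0 then (0:Int) else 1]) hlt]
      simp
    · rw [reverseAddressGo_stop _ _ h, reverseAddressGo_stop _ _ h]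
      simp

-- the core: the reversed loop output is B's digit list (for every n, trivially [] when n ≤ 1)
lemma core (k : Nat) :
    ∀ (n : Int), n.toNat ≤ k →
      (reverseAddressGo n []).reverse =
        (List.drop 1 (binCharsB n.toNat)).map (fun c => (c.toNat : Int) - 48) := by
  induction k with
  | zero =>
    intro n hk
    have h1 : ¬ n > 1 := by omega
    have h0 : n.toNat = 0 := by omega
    rw [reverseAddressGo_stop _ _ h1]
    simp [h0, binCharsB]
  | succ k ih =>
    intro n hk
    by_cases h : n > 1
    · have hpos : (0:Int) < 2 := by omega
      have hfd : PySem.Int.floordiv n 2 = n / 2 := PySem.Int.floordiv_eq_ediv_of_pos hpos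
      have hmd : PySem.Int.mod n 2 = n % 2 := PySem.Int.mod_eq_emod_of_pos hpos
      have hlt : (PySem.Int.floordiv n 2).toNat ≤ k := by rw [hfd]; omega
      have hne : n.toNat ≠ 0 := by omega
      have htl : (PySem.Int.floordiv n 2).toNat = n.toNat / 2 := by rw [hfd]; omega
      have hhalf_ne : n.toNat / 2 ≠ 0 := by omega
      have hlen : 1 ≤ (binCharsB (n.toNat / 2)).length := by
        have := binCharsB_ne_nil _ hhalf_ne
        cases hh : binCharsB (n.toNat / 2) with
        | nil => exact absurd hh this
        | cons a l => simp
      have hbit : (if PySem.Int.mod n 2 == 0 then (0:Int) else 1) =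
          ((if n.toNat % 2 = 1 then '1' else '0').toNat : Int) - 48 := by
        rw [hmd]
        have hcases : n % 2 = 0 ∨ n % 2 = 1 := by omega
        rcases hcases with h0 | h1
        · have : n.toNat % 2 = 0 := by omega
          simp [h0, this]
        · have : n.toNat % 2 = 1 := by omega
          simp [h1, this]
      rw [reverseAddressGo_step _ _ h,
          reverseAddressGo_append ((PySem.Int.floordiv n 2).toNat) _ _ le_rfl,
          List.reverse_append, ih _ hlt, htl]
      conv_rhs => rw [binCharsB]
      rw [dif_neg hne, List.drop_append_of_le_length hlen, List.map_append]
      rw [hbit]; simp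
    · rw [reverseAddressGo_stop _ _ h]
      have h0 : n.toNat = 0 ∨ n.toNat = 1 := by omega
      rcases h0 with h0 | h0 <;>
        simp [h0, binCharsB]

-- ===== VERDICT (by name: the statement is the Claim_ definition above) =====
theorem reverseAddress_spec : Claim_equal_reverseAddress := by
  intro nodeID _
  unfold Spec_reverseAddress reverseAddress reverseAddress_alt
  by_cases h : nodeID ≤ 1
  · rw [reverseAddressGo]
    have : ¬ nodeID > 1 := by omega
    simp [this, h]
  · simp only [h, if_false]
    rw [core nodeID.toNat _ le_rfl]
    rfl
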